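-- pv_equiv track=rewrite | github.com/a-farrell/Genbank-Scripts | makeDnaAfirst.py | reorderdictionary
-- ===== SOURCE A (Python) =====
-- def reorderdictionary(dictionary,num,highest):
-- 	newdict = {}
-- 	CDS = " "
-- 	DnaA = ""
-- 	key = 1
-- 	DnaA = dictionary[num]
-- 	for i in range(1,highest+1):
-- 		CDS = dictionary[num]
-- 		newdict[key] = CDS
-- 		key +=1
-- 		num += 1
-- 		if num > highest:
-- 			num = 1
-- 	return newdict, DnaA
-- ===== SOURCE B (Python) =====
-- def reorderdictionary(dictionary, num, highest):
--     DnaA = dictionary[num]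
--     vals = [dictionary[i] for i in range(1, highest + 1)]
--     rotated = vals[num - 1:] + vals[:num - 1]
--     newdict = {i + 1: v for i, v in enumerate(rotated)}
--     return newdict, DnaA
-- ===== Notes on version B (the rewrite author's own statement) =====
-- stated objective: idiomatic
-- what changed: Replaces the increment-and-wrap counter loop that inserts one key per iteration with building the ordered value list for keys 1..highest once, rotating it by list slicing, and re-keying it with a dict comprehension over enumerate.
-- outside the precondition, e.g. on reorderdictionary({2: 'c'}, 2, 1): A returns ({1: 'c'}, 'c'), B raises KeyError
import Mathlib
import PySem

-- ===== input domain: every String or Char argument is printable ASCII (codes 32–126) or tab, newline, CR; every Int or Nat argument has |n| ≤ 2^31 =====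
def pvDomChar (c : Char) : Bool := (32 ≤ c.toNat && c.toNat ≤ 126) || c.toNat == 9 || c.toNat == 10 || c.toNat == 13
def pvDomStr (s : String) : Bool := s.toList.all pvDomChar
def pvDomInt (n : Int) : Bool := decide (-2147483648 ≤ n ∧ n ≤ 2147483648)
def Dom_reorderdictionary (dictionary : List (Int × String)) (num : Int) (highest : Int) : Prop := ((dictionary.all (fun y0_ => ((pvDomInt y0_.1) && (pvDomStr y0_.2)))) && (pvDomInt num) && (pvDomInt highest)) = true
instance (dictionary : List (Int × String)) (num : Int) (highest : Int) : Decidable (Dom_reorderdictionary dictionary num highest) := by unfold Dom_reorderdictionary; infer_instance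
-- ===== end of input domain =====

-- B rotates a pre-built value table by slicing instead of A's increment-and-wrap counter loop;
-- objective: idiomatic. Proved equal on full dictionaries with 1 ≤ num ≤ highest (or empty highest ≤ 0 range), per Pre_.

-- ===== PORT A =====
-- dictionary[k] raises KeyError when k is missing: getD with "" is total, exact under Pre_ (all accessed keys present).
def reorderdictionary (dictionary : List (Int × String)) (num : Int) (highest : Int) : (List (Int × String)) × String :=
  let d := PySem.Dict.ofList dictionary
  let DnaA := d.getD num ""
  let st := (PySem.List.pyRange 1 (highest + 1) 1).foldl
    (fun (s : PySem.Dict Int String × Int × Int) _ =>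
      let CDS := d.getD s.2.2 ""
      let nd := s.1.insert s.2.1 CDS
      let key := s.2.1 + 1
      let n := s.2.2 + 1
      (nd, key, if n > highest then 1 else n))
    (PySem.Dict.empty, 1, num)
  (st.1.items, DnaA)

-- ===== PORT B =====
-- the dict comprehension {i+1: v for i, v in enumerate(rotated)} has strictly increasing fresh keys,
-- so its insertion-order association list is exactly the enumerated list (exact).
def reorderdictionary_alt (dictionary : List (Int × String)) (num : Int) (highest : Int) : (List (Int × String)) × String :=
  let d := PySem.Dict.ofList dictionary
  let DnaA := d.getD num ""
  let vals := (PySem.List.pyRange 1 (highest + 1) 1).map (fun i => d.getD i "")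
  let rotated := PySem.List.slice vals (some (num - 1)) none ++ PySem.List.slice vals none (some (num - 1))
  let newdict := (PySem.List.enumerate rotated).map (fun p => (p.1 + 1, p.2))
  (newdict, DnaA)

-- ===== PRECONDITION & SPEC =====
-- Pre_ excludes (a) inputs where Python raises KeyError (a key in 1..highest, or num itself, missing), and
-- (b) for highest ≥ 1, num outside 1..highest, where A's wrap loop reads the out-of-range key num directly
-- while B's slice rotation does not — a corner outside the natural rotation domain on which either behaviour
-- is defensible. (For highest ≤ 0 the loop is empty and any num with a present key is admitted.)
def Pre_reorderdictionary (dictionary : List (Int × String)) (num : Int) (highest : Int) : Prop :=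
  (PySem.Dict.ofList dictionary).contains num = true ∧
  (∀ i ∈ PySem.List.pyRange 1 (highest + 1) 1, (PySem.Dict.ofList dictionary).contains i = true) ∧
  (highest ≤ 0 ∨ (1 ≤ num ∧ num ≤ highest))
instance (dictionary : List (Int × String)) (num : Int) (highest : Int) : Decidable (Pre_reorderdictionary dictionary num highest) := by unfold Pre_reorderdictionary; infer_instance

def pvWitness_reorderdictionary : (List (Int × String)) × Int × Int := ([(1, "a"), (2, "b"), (3, "c")], 2, 3)

def Spec_reorderdictionary (dictionary : List (Int × String)) (num : Int) (highest : Int) (out : (List (Int × String)) × String) : Prop := out = reorderdictionary_alt dictionary num highest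
instance (dictionary : List (Int × String)) (num : Int) (highest : Int) (out : (List (Int × String)) × String) : Decidable (Spec_reorderdictionary dictionary num highest out) := by unfold Spec_reorderdictionary; infer_instance

-- ===== CLAIM (what is proved, stated in full; the proofs are below) =====
def Claim_equal_reorderdictionary : Prop := ∀ (dictionary : List (Int × String)) (num : Int) (highest : Int), Dom_reorderdictionary dictionary num highest → Pre_reorderdictionary dictionary num highest → Spec_reorderdictionary dictionary num highest (reorderdictionary dictionary num highest)

-- ===== LEMMAS AND PROOFS =====

-- position accessed at step j of A's wrap loop (0-indexed), for 1 ≤ num ≤ highest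
def posIdx (num highest : Int) (j : Nat) : Int :=
  if num + j ≤ highest then num + j else num + j - highest

-- A's loop body, with the ignored range element dropped
def stepA (d : PySem.Dict Int String) (highest : Int)
    (s : PySem.Dict Int String × Int × Int) : PySem.Dict Int String × Int × Int :=
  let CDS := d.getD s.2.2 ""
  let nd := s.1.insert s.2.1 CDS
  let key := s.2.1 + 1
  let n := s.2.2 + 1
  (nd, key, if n > highest then 1 else n)

lemma mem_enumerate_bounds {α : Type} (xs : List α) (s : Int) (q : Int × α)
    (h : q ∈ PySem.List.enumerate xs s) : s ≤ q.1 ∧ q.1 < s + xs.length := by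
  induction xs generalizing s with
  | nil => simp [PySem.List.enumerate_nil] at h
  | cons x xs ih =>
    rw [PySem.List.enumerate_cons, List.mem_cons] at h
    rcases h with h | h
    · subst h; simp
    · have := ih (s + 1) h; simp at this ⊢; omega

lemma enumerate_append_singleton {α : Type} (xs : List α) (v : α) (s : Int) :
    PySem.List.enumerate (xs ++ [v]) s = PySem.List.enumerate xs s ++ [(s + xs.length, v)] := by
  induction xs generalizing s with
  | nil => simp [PySem.List.enumerate_cons, PySem.List.enumerate_nil]
  | cons x xs ih =>
    simp only [List.cons_append, PySem.List.enumerate_cons, ih, List.length_cons]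
    congr 2
    push_cast
    ring_nf

lemma enum_shift {α : Type} (xs : List α) (s : Int) :
    (PySem.List.enumerate xs s).map (fun p => (p.1 + 1, p.2)) = PySem.List.enumerate xs (s + 1) := by
  induction xs generalizing s with
  | nil => simp [PySem.List.enumerate_nil]
  | cons x xs ih => simp [PySem.List.enumerate_cons, ih]

-- loop invariant for A
lemma stepA_iterate (d : PySem.Dict Int String) (num highest : Int)
    (_h1 : 1 ≤ num) (h2 : num ≤ highest) :
    ∀ k : Nat, (k : Int) ≤ highest →
      (stepA d highest)^[k] (PySem.Dict.empty, 1, num) =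
        (PySem.Dict.mk (PySem.List.enumerate ((List.range k).map (fun j => d.getD (posIdx num highest j) "")) 1),
         (k : Int) + 1, posIdx num highest k) := by
  intro k
  induction k with
  | zero => intro _; simp [PySem.Dict.empty, posIdx]; omega
  | succ k ih =>
    intro hk
    have hk' : (k : Int) ≤ highest := by push_cast at hk ⊢; omega
    rw [Function.iterate_succ_apply', ih hk']
    have hfresh : (PySem.Dict.mk (PySem.List.enumerate ((List.range k).map (fun j => d.getD (posIdx num highest j) "")) 1)).contains ((k : Int) + 1) = false := by
      rw [Bool.eq_false_iff]
      intro hc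
      rw [PySem.Dict.contains_iff_mem_keys] at hc
      simp only [PySem.Dict.keys] at hc
      obtain ⟨q, hq, hq1⟩ := List.mem_map.mp hc
      have hb := mem_enumerate_bounds _ _ _ hq
      simp only [List.length_map, List.length_range] at hb
      omega
    have hins : (PySem.Dict.mk (PySem.List.enumerate ((List.range k).map (fun j => d.getD (posIdx num highest j) "")) 1)).insert ((k : Int) + 1) (d.getD (posIdx num highest k) "") = PySem.Dict.mk (PySem.List.enumerate ((List.range (k + 1)).map (fun j => d.getD (posIdx num highest j) "")) 1) := by
      apply PySem.Dict.ext
      rw [PySem.Dict.items_insert_of_not_contains _ _ hfresh]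
      simp only [List.range_succ, List.map_append, List.map_singleton]
      rw [enumerate_append_singleton]
      congr 3
      simp
      omega
    unfold stepA
    dsimp only
    refine Prod.ext ?_ (Prod.ext ?_ ?_)
    · exact hins
    · push_cast; ring
    · simp only [posIdx]
      split_ifs <;> push_cast <;> omega

lemma rotated_eq (d : PySem.Dict Int String) (num highest : Int)
    (h1 : 1 ≤ num) (h2 : num ≤ highest) :
    PySem.List.slice ((PySem.List.pyRange 1 (highest + 1) 1).map (fun i => d.getD i "")) (some (num - 1)) none ++
      PySem.List.slice ((PySem.List.pyRange 1 (highest + 1) 1).map (fun i => d.getD i "")) none (some (num - 1)) =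
    (List.range highest.toNat).map (fun j => d.getD (posIdx num highest j) "") := by
  have hh1 : (0 : Int) ≤ num - 1 := by omega
  rw [PySem.List.slice_from _ hh1, PySem.List.slice_to _ hh1, PySem.List.pyRange_one]
  have hHe : (highest + 1 - 1).toNat = highest.toNat := by omega
  rw [hHe, List.map_map]
  set H := highest.toNat with hH
  set m := (num - 1).toNat with hm
  have hmH : m ≤ H := by omega
  apply List.ext_getElem
  · simp; omega
  · intro i hi1 hi2
    simp only [List.length_append, List.length_drop, List.length_take, List.length_map,
      List.length_range, min_eq_left hmH] at hi1
    rw [List.getElem_append]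
    split
    · rename_i hlt
      simp only [List.getElem_drop, List.getElem_map, List.getElem_range, Function.comp_apply]
      simp only [List.length_drop, List.length_map, List.length_range] at hlt
      have harg : (1 : Int) + (m + i : Nat) = posIdx num highest i := by
        simp only [posIdx]
        rw [if_pos (by omega)]
        omega
      rw [harg]
    · rename_i hge
      simp only [List.length_drop, List.length_map, List.length_range] at hge
      simp only [List.length_drop, List.length_map, List.length_range, List.getElem_take,
        List.getElem_map, List.getElem_range, Function.comp_apply]
      have harg : (1 : Int) + (i - (H - m) : Nat) = posIdx num highest i := by
        simp only [posIdx]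
        rw [if_neg (by omega)]
        omega
      rw [harg]

-- ===== VERDICT (by name: the statement is the Claim_ definition above) =====
theorem reorderdictionary_spec : Claim_equal_reorderdictionary := by
  intro dictionary num highest _ hpre
  obtain ⟨-, -, hcase⟩ := hpre
  unfold Spec_reorderdictionary reorderdictionary reorderdictionary_alt
  dsimp only
  rcases hcase with hle | ⟨h1, h2⟩
  · rw [PySem.List.pyRange_one_eq_nil (by omega)]
    simp [PySem.Dict.empty, PySem.List.enumerate_nil, PySem.List.slice]
  set d := PySem.Dict.ofList dictionary with hd
  have hfold : (PySem.List.pyRange 1 (highest + 1) 1).foldl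
      (fun (s : PySem.Dict Int String × Int × Int) _ =>
        let CDS := d.getD s.2.2 ""
        let nd := s.1.insert s.2.1 CDS
        let key := s.2.1 + 1
        let n := s.2.2 + 1
        (nd, key, if n > highest then 1 else n))
      (PySem.Dict.empty, 1, num) =
      (stepA d highest)^[(PySem.List.pyRange 1 (highest + 1) 1).length] (PySem.Dict.empty, 1, num) :=
    List.foldl_const _ _ _
  rw [hfold, PySem.List.length_pyRange_one]
  have hlen : (highest + 1 - 1).toNat = highest.toNat := by omega
  rw [hlen]
  have hint : (highest.toNat : Int) ≤ highest := by omega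
  rw [stepA_iterate d num highest h1 h2 highest.toNat hint]
  rw [rotated_eq d num highest h1 h2, enum_shift]
  rfl
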